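-- pv_equiv track=rewrite | github.com/rafaelmdc/homorepeat | apps/browser/stats/summaries.py | _build_length_count_pairs
-- ===== SOURCE A (Python) =====
-- from collections import defaultdict
--
-- def _build_length_count_pairs(lengths):
--     if not lengths:
--         return []
--
--     counts_by_length = defaultdict(int)
--     for length in lengths:
--         counts_by_length[int(length)] += 1
--     return [
--         (length, counts_by_length[length])
--         for length in sorted(counts_by_length)
--     ]
-- ===== SOURCE B (Python) =====
-- def _build_length_count_pairs(lengths):
--     vals = sorted(int(x) for x in lengths)
--     pairs = []
--     i, n = 0, len(vals)
--     while i < n: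
--         j = i
--         while j < n and vals[j] == vals[i]:
--             j += 1
--         pairs.append((vals[i], j - i))
--         i = j
--     return pairs
-- ===== Notes on version B (the rewrite author's own statement) =====
-- stated objective: alternative
-- what changed: Replaces the defaultdict frequency table + key-sort with sort-all-then-scan-runs: sort the coerced values once and emit one (value, run length) pair per maximal run.
import Mathlib
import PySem

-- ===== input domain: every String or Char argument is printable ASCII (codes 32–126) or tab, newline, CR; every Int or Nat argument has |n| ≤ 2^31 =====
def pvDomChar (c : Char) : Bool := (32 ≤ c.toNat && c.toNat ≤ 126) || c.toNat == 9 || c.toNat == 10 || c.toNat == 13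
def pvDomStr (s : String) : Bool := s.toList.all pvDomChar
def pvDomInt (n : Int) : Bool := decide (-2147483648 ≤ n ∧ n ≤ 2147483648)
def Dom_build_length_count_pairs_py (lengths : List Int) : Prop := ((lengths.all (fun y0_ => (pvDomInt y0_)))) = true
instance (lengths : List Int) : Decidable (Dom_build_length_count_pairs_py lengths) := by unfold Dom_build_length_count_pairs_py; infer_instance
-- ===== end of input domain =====

-- B replaces A's defaultdict frequency table + key-sort with a sort-then-scan-runs pass (alternative decomposition, same cost).


-- ===== PORT A =====
-- defaultdict(int) with `counts[int(length)] += 1` is exactly PySem's counting fold.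
def build_length_count_pairs_py (lengths : List Int) : List (Int × Int) :=
  if lengths = [] then []
  else
    let counts_by_length := lengths.foldl (fun d x => d.modify x 0 (· + 1)) PySem.Dict.empty
    (PySem.List.sorted counts_by_length.keys (fun k => k) false).map
      (fun length => (length, counts_by_length.getD length 0))

-- ===== PORT B =====
-- the outer while loop emits one pair per maximal run of equal values; the inner
-- `while j < n and vals[j] == vals[i]` advance is the takeWhile over that run
def groupRuns (ys : List Int) : List (Int × Int) :=
  match ys with
  | [] => []
  | x :: t =>
    (x, ((t.takeWhile (fun y => y == x)).length : Int) + 1) ::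
      groupRuns (t.dropWhile (fun y => y == x))
termination_by ys.length
decreasing_by
  simp only [List.length_cons]
  exact Nat.lt_succ_of_le (List.length_dropWhile_le _ _)

def build_length_count_pairs_py_alt (lengths : List Int) : List (Int × Int) :=
  groupRuns (PySem.List.sorted lengths (fun x => x) false)

-- ===== PRECONDITION & SPEC =====
def Spec_build_length_count_pairs_py (lengths : List Int) (out : List (Int × Int)) : Prop := out = build_length_count_pairs_py_alt lengths
instance (lengths : List Int) (out : List (Int × Int)) : Decidable (Spec_build_length_count_pairs_py lengths out) := by unfold Spec_build_length_count_pairs_py; infer_instance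

-- ===== CLAIM (what is proved, stated in full; the proofs are below) =====
def Claim_equal_build_length_count_pairs_py : Prop := ∀ (lengths : List Int), Dom_build_length_count_pairs_py lengths → Spec_build_length_count_pairs_py lengths (build_length_count_pairs_py lengths)

-- ===== LEMMAS AND PROOFS =====

-- canonical form both programs compute: sorted distinct values, each with its multiplicity
def canon (xs : List Int) : List (Int × Int) :=
  (PySem.List.sorted (PySem.Set.ofList xs) (fun k => k) false).map
    (fun k => (k, (xs.count k : Int)))

theorem canon_perm (xs ys : List Int) (h : xs.Perm ys) : canon xs = canon ys := by
  unfold canon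
  have hperm : (PySem.Set.ofList xs).Perm (PySem.Set.ofList ys) :=
    (List.perm_ext_iff_of_nodup (PySem.Set.nodup_ofList xs) (PySem.Set.nodup_ofList ys)).2
      (fun a => by simp [PySem.Set.mem_ofList, h.mem_iff])
  rw [PySem.List.sorted_eq_sorted_of_perm _ _ _ (fun a b hab => hab) hperm]
  exact List.map_congr_left (fun k _ => by rw [h.count_eq])

theorem a_eq_canon (xs : List Int) : build_length_count_pairs_py xs = canon xs := by
  unfold build_length_count_pairs_py canon
  split
  · rename_i h; subst h; rfl
  · rw [← PySem.Dict.counter_eq_foldl]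
    simp [PySem.Dict.keys_counter, PySem.Dict.getD_counter]

theorem lt_of_mem_dropWhile_of_sorted (x : Int) (t : List Int)
    (ht : t.Pairwise (· ≤ ·)) (hx : ∀ e ∈ t, x ≤ e) :
    ∀ e ∈ t.dropWhile (fun y => y == x), x < e := by
  induction t with
  | nil => simp
  | cons a s ih =>
    rw [List.dropWhile_cons]
    rcases List.pairwise_cons.1 ht with ⟨ha, hs⟩
    by_cases hax : a = x
    · simp only [hax, beq_self_eq_true, if_true]
      exact ih hs (fun e he => hx e (List.mem_cons_of_mem _ he))
    · simp only [beq_iff_eq, hax, if_false]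
      intro e he
      have hxa : x < a := lt_of_le_of_ne (hx a (List.mem_cons_self)) (fun h => hax h.symm)
      rcases List.mem_cons.1 he with rfl | hes
      · exact hxa
      · exact lt_of_lt_of_le hxa (ha e hes)

theorem groupRuns_sorted_eq_canon (ys : List Int) (h : ys.Pairwise (· ≤ ·)) :
    groupRuns ys = canon ys := by
  induction ys using groupRuns.induct with
  | case1 => rw [groupRuns]; rfl
  | case2 x t ih =>
    rcases List.pairwise_cons.1 h with ⟨hx, ht⟩
    set t1 := t.takeWhile (fun y => y == x) with ht1
    set t2 := t.dropWhile (fun y => y == x) with ht2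
    have hlt : ∀ e ∈ t2, x < e := lt_of_mem_dropWhile_of_sorted x t ht hx
    have ht2p : t2.Pairwise (· ≤ ·) := List.Pairwise.sublist (List.dropWhile_sublist _) ht
    have hsplit : t1 ++ t2 = t := List.takeWhile_append_dropWhile
    have hxt2 : x ∉ t2 := fun hm => lt_irrefl x (hlt x hm)
    have ht1x : ∀ b ∈ t1, b = x := fun b hb => beq_iff_eq.1 (List.mem_takeWhile_imp (p := fun y => y == x) (ht1 ▸ hb))
    have hcount1 : t1.count x = t1.length :=
      List.count_eq_length.2 (fun b hb => (ht1x b hb).symm)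
    have hcx : (x :: t).count x = t1.length + 1 := by
      rw [← hsplit]
      simp [List.count_append, hcount1, List.count_eq_zero.2 hxt2]
    have hS2nd : (PySem.List.sorted (PySem.Set.ofList t2) (fun k => k) false).Nodup :=
      (PySem.List.sorted_perm (PySem.Set.ofList t2) (fun k => k) false).symm.nodup
        (PySem.Set.nodup_ofList t2)
    have hmemS2 : ∀ a : Int, a ∈ PySem.List.sorted (PySem.Set.ofList t2) (fun k => k) false ↔ a ∈ t2 :=
      fun a => by rw [PySem.List.mem_sorted]; exact PySem.Set.mem_ofList t2 a
    have hsort : PySem.List.sorted (PySem.Set.ofList (x :: t)) (fun k => k) false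
        = x :: PySem.List.sorted (PySem.Set.ofList t2) (fun k => k) false := by
      apply PySem.List.sorted_eq_of_perm_of_pairwise_lt
      · apply (List.perm_ext_iff_of_nodup ?_ (PySem.Set.nodup_ofList _)).2
        · intro a
          rw [PySem.Set.mem_ofList, List.mem_cons, List.mem_cons, hmemS2]
          constructor
          · rintro (rfl | ha)
            · exact Or.inl rfl
            · exact Or.inr (by rw [← hsplit]; exact List.mem_append_right _ ha)
          · rintro (rfl | ha)
            · exact Or.inl rfl
            · rw [← hsplit] at ha
              rcases List.mem_append.1 ha with h1 | h2
              · exact Or.inl (ht1x a h1)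
              · exact Or.inr h2
        · exact List.nodup_cons.2 ⟨fun hm => hxt2 ((hmemS2 x).1 hm), hS2nd⟩
      · apply List.pairwise_cons.2
        exact ⟨fun e he => hlt e ((hmemS2 e).1 he), PySem.List.sorted_ofList_pairwise_lt t2⟩
    rw [groupRuns, ih ht2p]
    unfold canon
    rw [hsort, List.map_cons, hcx]
    push_cast
    congr 1
    apply List.map_congr_left
    intro k hk
    have hk2 : k ∈ t2 := (hmemS2 k).1 hk
    have hkx : k ≠ x := fun hh => lt_irrefl x (hh ▸ hlt k hk2)
    have hk1 : k ∉ t1 := fun hm => hkx (ht1x k hm)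
    have hc : (x :: t).count k = t2.count k := by
      rw [← hsplit]
      simp [List.count_cons, List.count_append, List.count_eq_zero.2 hk1]
      exact fun hh => hkx hh.symm
    rw [hc]

theorem b_eq_canon (xs : List Int) : build_length_count_pairs_py_alt xs = canon xs := by
  unfold build_length_count_pairs_py_alt
  rw [groupRuns_sorted_eq_canon _ (PySem.List.sorted_pairwise xs (fun x => x))]
  exact canon_perm _ _ (PySem.List.sorted_perm xs (fun x => x) false)

-- ===== VERDICT (by name: the statement is the Claim_ definition above) =====
theorem build_length_count_pairs_py_spec : Claim_equal_build_length_count_pairs_py := by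
  intro xs _
  unfold Spec_build_length_count_pairs_py
  rw [a_eq_canon, b_eq_canon]
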